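-- pv_equiv track=rewrite | github.com/fuquery/rsl | docs/postprocess.py | _replace_macros_in_text
-- ===== SOURCE A (Python) =====
-- from typing import Dict, List, Optional
--
-- def _replace_macros_in_text(text: str) -> str:
--     """Replace $lift(expr) with ^^expr and decltype() with /* ... */."""
--     out: List[str] = []
--     pos = 0
--
--     while pos < len(text):
--         next_lift = text.find('$lift(', pos)
--         if next_lift == -1:
--             out.append(text[pos:])
--             break
--
--         out.append(text[pos:next_lift])
--         i = next_lift + len('$lift(')
--         depth = 1
--         start = i
--
--         while i < len(text) and depth > 0:
--             if text[i] == '(':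
--                 depth += 1
--             elif text[i] == ')':
--                 depth -= 1
--             i += 1
--
--         if depth == 0:
--             out.append('^^' + text[start:i-1])
--             pos = i
--         else:
--             out.append(text[next_lift:])
--             break
--
--     result = ''.join(out)
--     return result.replace('decltype()', '/* ... */')
-- ===== SOURCE B (Python) =====
-- def _replace_macros_in_text(text: str) -> str:
--     """Replace $lift(expr) with ^^expr and decltype() with /* ... */.
--     Single left-to-right character scan with an explicit depth state."""
--     out = []
--     raw = []    # raw text of the pending $lift( construct (flushed verbatim at EOF)
--     expr = []   # expression chars collected so far inside the pending lift
--     depth = 0   # 0 = not inside a $lift( construct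
--     i = 0
--     n = len(text)
--     while i < n:
--         if depth == 0:
--             if text.startswith('$lift(', i):
--                 raw = ['$lift(']
--                 expr = []
--                 depth = 1
--                 i += 6
--             else:
--                 out.append(text[i])
--                 i += 1
--         else:
--             c = text[i]
--             raw.append(c)
--             i += 1
--             if c == '(':
--                 depth += 1
--                 expr.append(c)
--             elif c == ')':
--                 depth -= 1
--                 if depth == 0:
--                     out.append('^^' + ''.join(expr))
--                 else:
--                     expr.append(c)
--             else:
--                 expr.append(c)
--     if depth > 0:
--         out.append(''.join(raw))
--     return ''.join(out).replace('decltype()', '/* ... */')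
-- ===== Notes on version B (the rewrite author's own statement) =====
-- stated objective: alternative
-- what changed: A repeatedly calls str.find('$lift(') and runs a separate inner paren-matching loop over absolute indices; B is one linear character scan with an explicit state machine (depth counter, raw/expr buffers) that detects '$lift(' in place and flushes the raw buffer on an unbalanced EOF.
import Mathlib
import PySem

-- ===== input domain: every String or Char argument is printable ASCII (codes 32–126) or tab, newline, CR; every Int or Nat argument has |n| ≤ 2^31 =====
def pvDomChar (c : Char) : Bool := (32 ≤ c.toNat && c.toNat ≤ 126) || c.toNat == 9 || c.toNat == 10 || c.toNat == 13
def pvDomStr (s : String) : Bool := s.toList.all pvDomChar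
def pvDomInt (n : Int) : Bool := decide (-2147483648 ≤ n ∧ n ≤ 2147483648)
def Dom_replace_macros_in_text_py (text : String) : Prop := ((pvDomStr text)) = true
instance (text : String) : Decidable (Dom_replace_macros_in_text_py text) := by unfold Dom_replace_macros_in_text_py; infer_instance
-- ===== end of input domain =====

-- B replaces A's find('$lift(')-plus-inner-paren-loop structure by a single linear
-- character scan with an explicit state machine (alternative decomposition, no speed claim).

-- the literal '$lift(' both Pythons search for
def pvLift : List Char := ['$', 'l', 'i', 'f', 't', '(']

-- termination measures of the two loops (cited by name in decreasing_by so the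
-- definitions carry only small proof terms)
theorem pvDecIdx {n i : Nat} (h : i < n) : n - (i + 1) < n - i := by omega

-- ===== PORT A =====
-- A's inner `while i < len(text) and depth > 0` paren-matching loop
def pvInnerA (s : List Char) (i d : Nat) : Nat × Nat :=
  if h : i < s.length ∧ 0 < d then
    if s[i]'h.1 = '(' then pvInnerA s (i + 1) (d + 1)
    else if s[i]'h.1 = ')' then pvInnerA s (i + 1) (d - 1)
    else pvInnerA s (i + 1) d
  else (i, d)
termination_by s.length - i
decreasing_by all_goals exact pvDecIdx h.1

-- the inner loop never moves the index backwards (cited by pvOuterA's termination)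
theorem pvInnerA_fst_ge (s : List Char) (i d : Nat) : i ≤ (pvInnerA s i d).1 := by
  rw [pvInnerA]
  split
  · rename_i h
    split
    · exact le_trans (by omega) (pvInnerA_fst_ge s (i + 1) (d + 1))
    · split
      · exact le_trans (by omega) (pvInnerA_fst_ge s (i + 1) (d - 1))
      · exact le_trans (by omega) (pvInnerA_fst_ge s (i + 1) d)
  · simp
termination_by s.length - i

theorem pvDecOuter (s : List Char) (pos : Nat) (hpos : pos < s.length)
    (hnl : ¬ PySem.Chars.findFrom s pvLift (pos : Int) = -1) :
    s.length - (pvInnerA s ((PySem.Chars.findFrom s pvLift (pos : Int)).toNat + 6) 1).1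
      < s.length - pos := by
  have hle : pos ≤ s.length := le_of_lt hpos
  have hspec := PySem.Chars.findFrom_natCast_spec s pvLift pos hle hnl
  have h0 : (pos : Int) ≤ PySem.Chars.findFrom s pvLift (pos : Int) := hspec.1
  have h1 : pos ≤ (PySem.Chars.findFrom s pvLift (pos : Int)).toNat := by omega
  have h2 := pvInnerA_fst_ge s ((PySem.Chars.findFrom s pvLift (pos : Int)).toNat + 6) 1
  omega

-- A's outer `while pos < len(text)` loop accumulating `out`
-- (the repeated `findFrom`/`pvInnerA` expressions are Python's `next_lift` / `(i, depth)`)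
def pvOuterA (s : List Char) (pos : Nat) (out : List (List Char)) : List (List Char) :=
  if hpos : pos < s.length then
    if hnl : PySem.Chars.findFrom s pvLift (pos : Int) = -1 then
      out ++ [PySem.Chars.slice s (some (pos : Int)) none]
    else
      if (pvInnerA s ((PySem.Chars.findFrom s pvLift (pos : Int)).toNat + 6) 1).2 = 0 then
        pvOuterA s (pvInnerA s ((PySem.Chars.findFrom s pvLift (pos : Int)).toNat + 6) 1).1
          ((out ++ [PySem.Chars.slice s (some (pos : Int)) (some (PySem.Chars.findFrom s pvLift (pos : Int)))]) ++
            [('^' :: '^' :: PySem.Chars.slice s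
                (some (((PySem.Chars.findFrom s pvLift (pos : Int)).toNat + 6 : Nat) : Int))
                (some (((pvInnerA s ((PySem.Chars.findFrom s pvLift (pos : Int)).toNat + 6) 1).1 : Int) - 1)))])
      else
        (out ++ [PySem.Chars.slice s (some (pos : Int)) (some (PySem.Chars.findFrom s pvLift (pos : Int)))]) ++
          [PySem.Chars.slice s (some (PySem.Chars.findFrom s pvLift (pos : Int))) none]
  else out
termination_by s.length - pos
decreasing_by exact pvDecOuter s pos hpos hnl

def replace_macros_in_text_py (text : String) : String :=
  PySem.Str.replace (String.ofList (pvOuterA text.toList 0 []).flatten) "decltype()" "/* ... */"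

-- ===== PORT B =====
theorem pvDecDrop6 (c : Char) (rest : List Char) :
    ((c :: rest).drop 6).length < (c :: rest).length := by simp
theorem pvDecTail (c : Char) (rest : List Char) : rest.length < (c :: rest).length := by simp

-- B's single scan: depth = 0 means "not inside a $lift(", raw/expr are the buffers
def pvScanB (u : List Char) (out : List (List Char)) (raw expr : List Char) (depth : Nat) : List (List Char) :=
  match u with
  | [] => if 0 < depth then out ++ [raw] else out
  | c :: rest =>
    if depth = 0 then
      if PySem.Chars.startswith (c :: rest) pvLift then
        pvScanB ((c :: rest).drop 6) out pvLift [] 1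
      else
        pvScanB rest (out ++ [[c]]) raw expr depth
    else
      if c = '(' then pvScanB rest out (raw ++ [c]) (expr ++ [c]) (depth + 1)
      else if c = ')' then
        if depth - 1 = 0 then pvScanB rest (out ++ ['^' :: '^' :: expr]) (raw ++ [c]) expr 0
        else pvScanB rest out (raw ++ [c]) (expr ++ [c]) (depth - 1)
      else pvScanB rest out (raw ++ [c]) (expr ++ [c]) depth
termination_by u.length
decreasing_by
  · exact pvDecDrop6 c rest
  · exact pvDecTail c rest
  · exact pvDecTail c rest
  · exact pvDecTail c rest
  · exact pvDecTail c rest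
  · exact pvDecTail c rest

def replace_macros_in_text_py_alt (text : String) : String :=
  PySem.Str.replace (String.ofList (pvScanB text.toList [] [] [] 0).flatten) "decltype()" "/* ... */"

-- ===== PRECONDITION & SPEC =====
def Spec_replace_macros_in_text_py (text : String) (out : String) : Prop := out = replace_macros_in_text_py_alt text
instance (text : String) (out : String) : Decidable (Spec_replace_macros_in_text_py text out) := by unfold Spec_replace_macros_in_text_py; infer_instance

-- ===== CLAIM (what is proved, stated in full; the proofs are below) =====
def Claim_equal_replace_macros_in_text_py : Prop := ∀ (text : String), Dom_replace_macros_in_text_py text → Spec_replace_macros_in_text_py text (replace_macros_in_text_py text)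

-- ===== LEMMAS AND PROOFS =====

-- depth update for one character
def pvStep (c : Char) (d : Nat) : Nat := if c = '(' then d + 1 else if c = ')' then d - 1 else d

-- number of chars consumed until the paren depth first reaches 0 (none = never)
def pvPClose : List Char → Nat → Option Nat
  | [], _ => none
  | c :: rest, d =>
    if pvStep c d = 0 then some 1 else (pvPClose rest (pvStep c d)).map (· + 1)

theorem pvPClose_bounds {u : List Char} {d k : Nat} (h : pvPClose u d = some k) :
    1 ≤ k ∧ k ≤ u.length := by
  induction u generalizing d k with
  | nil => simp [pvPClose] at h
  | cons c rest ih =>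
    simp only [pvPClose] at h
    split at h
    · simp at h; simp only [List.length_cons]; omega
    · cases hrec : pvPClose rest (pvStep c d) with
      | none => rw [hrec] at h; simp at h
      | some k' =>
        rw [hrec] at h; simp at h
        have := ih hrec
        simp only [List.length_cons]; omega

theorem pvDecGA (t : List Char) (h : pvLift <:+: t) (j k : Nat) :
    ((t.drop (j + 6)).drop k).length < t.length := by
  have h6 : 6 ≤ t.length := by simpa [pvLift] using h.length_le
  simp; omega

-- the common suffix-level specification of both programs (before the decltype replace)
def pvGA (t : List Char) : List Char :=
  if h : pvLift <:+: t then
    match pvPClose (t.drop ((PySem.Chars.find t pvLift).toNat + 6)) 1 with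
    | some k =>
        t.take (PySem.Chars.find t pvLift).toNat ++
          '^' :: '^' :: (t.drop ((PySem.Chars.find t pvLift).toNat + 6)).take (k - 1) ++
          pvGA ((t.drop ((PySem.Chars.find t pvLift).toNat + 6)).drop k)
    | none => t
  else t
termination_by t.length
decreasing_by exact pvDecGA t h _ _

theorem pvGA_nil : pvGA [] = [] := by
  rw [pvGA]; simp [List.infix_nil, pvLift]

theorem pvFlattenSingletons (u : List Char) : (u.map fun c => [c]).flatten = u := by
  induction u <;> simp [*]

theorem pvLift_reconstruct {u : List Char} {j : Nat} (h : pvLift <+: u.drop j) :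
    u.take j ++ (pvLift ++ u.drop (j + 6)) = u := by
  obtain ⟨t, ht⟩ := h
  have h6 : u.drop (j + 6) = t := by
    have hd : u.drop (j + 6) = (u.drop j).drop 6 := by rw [List.drop_drop]
    rw [hd, ← ht]
    simpa [pvLift] using List.drop_left pvLift t
  rw [h6, ht, List.take_append_drop]

theorem pvInnerA_some (s : List Char) (i d k : Nat) (hi : i ≤ s.length) (hd : 0 < d)
    (h : pvPClose (s.drop i) d = some k) : pvInnerA s i d = (i + k, 0) := by
  by_cases hi' : i < s.length
  case neg =>
    have he : i = s.length := by omega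
    rw [he, List.drop_length] at h; simp [pvPClose] at h
  case pos =>
  rw [List.drop_eq_getElem_cons hi'] at h
  simp only [pvPClose] at h
  rw [pvInnerA, dif_pos ⟨hi', hd⟩]
  by_cases h0 : pvStep (s[i]'hi') d = 0
  · rw [if_pos h0] at h
    have hk : k = 1 := by simpa using h.symm
    have hcd : s[i]'hi' = ')' ∧ d = 1 := by
      by_cases hc : s[i]'hi' = '('
      · exfalso; simp [pvStep, hc] at h0
      · by_cases hc' : s[i]'hi' = ')'
        · refine ⟨hc', ?_⟩
          have hzz : d - 1 = 0 := by simpa [pvStep, hc, hc'] using h0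
          omega
        · exfalso
          have hzz : d = 0 := by simpa [pvStep, hc, hc'] using h0
          omega
    rw [if_neg (by rw [hcd.1]; decide), if_pos hcd.1, hcd.2, hk]
    rw [pvInnerA]; simp
  · rw [if_neg h0] at h
    cases hrec : pvPClose (s.drop (i + 1)) (pvStep (s[i]'hi') d) with
    | none => rw [hrec] at h; simp at h
    | some k' =>
      rw [hrec] at h; simp at h
      have hd' : 0 < pvStep (s[i]'hi') d := Nat.pos_of_ne_zero h0
      have IH := pvInnerA_some s (i + 1) (pvStep (s[i]'hi') d) k' (by omega) hd' hrec
      by_cases hc1 : s[i]'hi' = '('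
      · rw [if_pos hc1]
        rw [show pvStep (s[i]'hi') d = d + 1 from by simp [pvStep, hc1]] at IH
        rw [IH]; rw [Prod.mk.injEq]; constructor
        · omega
        · rfl
      · by_cases hc2 : s[i]'hi' = ')'
        · rw [if_neg hc1, if_pos hc2]
          rw [show pvStep (s[i]'hi') d = d - 1 from by simp [pvStep, hc1, hc2]] at IH
          rw [IH]; rw [Prod.mk.injEq]; constructor
          · omega
          · rfl
        · rw [if_neg hc1, if_neg hc2]
          rw [show pvStep (s[i]'hi') d = d from by simp [pvStep, hc1, hc2]] at IH
          rw [IH]; rw [Prod.mk.injEq]; constructor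
          · omega
          · rfl
termination_by s.length - i

theorem pvInnerA_none (s : List Char) (i d : Nat) (hi : i ≤ s.length) (hd : 0 < d)
    (h : pvPClose (s.drop i) d = none) :
    (pvInnerA s i d).1 = s.length ∧ 0 < (pvInnerA s i d).2 := by
  by_cases hi' : i < s.length
  case neg =>
    have he : i = s.length := by omega
    rw [pvInnerA, dif_neg (by omega)]
    exact ⟨he, hd⟩
  case pos =>
  rw [List.drop_eq_getElem_cons hi'] at h
  simp only [pvPClose] at h
  by_cases h0 : pvStep (s[i]'hi') d = 0
  · rw [if_pos h0] at h; simp at h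
  · rw [if_neg h0] at h
    have hrec : pvPClose (s.drop (i + 1)) (pvStep (s[i]'hi') d) = none := by
      cases hx : pvPClose (s.drop (i + 1)) (pvStep (s[i]'hi') d) with
      | none => rfl
      | some k' => rw [hx] at h; simp at h
    have hd' : 0 < pvStep (s[i]'hi') d := Nat.pos_of_ne_zero h0
    have IH := pvInnerA_none s (i + 1) (pvStep (s[i]'hi') d) (by omega) hd' hrec
    rw [pvInnerA, dif_pos ⟨hi', hd⟩]
    by_cases hc1 : s[i]'hi' = '('
    · rw [if_pos hc1]
      rwa [show pvStep (s[i]'hi') d = d + 1 from by simp [pvStep, hc1]] at IH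
    · by_cases hc2 : s[i]'hi' = ')'
      · rw [if_neg hc1, if_pos hc2]
        rwa [show pvStep (s[i]'hi') d = d - 1 from by simp [pvStep, hc1, hc2]] at IH
      · rw [if_neg hc1, if_neg hc2]
        rwa [show pvStep (s[i]'hi') d = d from by simp [pvStep, hc1, hc2]] at IH
termination_by s.length - i

theorem pvScanB_close {u : List Char} {d k : Nat} (hd : 0 < d) (h : pvPClose u d = some k)
    (out : List (List Char)) (raw expr : List Char) :
    pvScanB u out raw expr d =
      pvScanB (u.drop k) (out ++ ['^' :: '^' :: (expr ++ u.take (k - 1))])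
        (raw ++ u.take k) (expr ++ u.take (k - 1)) 0 := by
  induction u generalizing d k out raw expr with
  | nil => simp [pvPClose] at h
  | cons c rest ih =>
    simp only [pvPClose] at h
    rw [pvScanB, if_neg (by omega)]
    by_cases h0 : pvStep c d = 0
    · rw [if_pos h0] at h
      have hk : k = 1 := by simpa using h.symm
      have hcd : c = ')' ∧ d = 1 := by
        by_cases hc : c = '('
        · exfalso; simp [pvStep, hc] at h0
        · by_cases hc' : c = ')'
          · refine ⟨hc', ?_⟩
            have hzz : d - 1 = 0 := by simpa [pvStep, hc, hc'] using h0
            omega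
          · exfalso
            have hzz : d = 0 := by simpa [pvStep, hc, hc'] using h0
            omega
      rw [if_neg (by rw [hcd.1]; decide), if_pos hcd.1, if_pos (by simp [hcd.2]), hk]
      simp
    · rw [if_neg h0] at h
      cases hrec : pvPClose rest (pvStep c d) with
      | none => rw [hrec] at h; simp at h
      | some k' =>
        rw [hrec] at h; simp at h
        have hkb := pvPClose_bounds hrec
        obtain ⟨m, rfl⟩ : ∃ m, k' = m + 1 := ⟨k' - 1, by omega⟩
        have hkk : k = m + 2 := by omega
        subst hkk
        have hd' : 0 < pvStep c d := Nat.pos_of_ne_zero h0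
        by_cases hc1 : c = '('
        · rw [if_pos hc1]
          have IH := ih (d := pvStep c d) hd' hrec out (raw ++ [c]) (expr ++ [c])
          rw [show pvStep c d = d + 1 from by simp [pvStep, hc1]] at IH
          rw [IH]; simp
        · by_cases hc2 : c = ')'
          · rw [if_neg hc1, if_pos hc2]
            have hne : ¬ d - 1 = 0 := by
              intro hx; apply h0; simp [pvStep, hc1, hc2, hx]
            rw [if_neg hne]
            have IH := ih (d := pvStep c d) hd' hrec out (raw ++ [c]) (expr ++ [c])
            rw [show pvStep c d = d - 1 from by simp [pvStep, hc1, hc2]] at IH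
            rw [IH]; simp
          · rw [if_neg hc1, if_neg hc2]
            have IH := ih (d := pvStep c d) hd' hrec out (raw ++ [c]) (expr ++ [c])
            rw [show pvStep c d = d from by simp [pvStep, hc1, hc2]] at IH
            rw [IH]; simp

theorem pvScanB_open {u : List Char} {d : Nat} (hd : 0 < d) (h : pvPClose u d = none)
    (out : List (List Char)) (raw expr : List Char) :
    pvScanB u out raw expr d = out ++ [raw ++ u] := by
  induction u generalizing d out raw expr with
  | nil => rw [pvScanB, if_pos hd]; simp
  | cons c rest ih =>
    simp only [pvPClose] at h
    have h0 : ¬ pvStep c d = 0 := by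
      intro hx; rw [if_pos hx] at h; simp at h
    rw [if_neg h0] at h
    have hrec : pvPClose rest (pvStep c d) = none := by
      cases hx : pvPClose rest (pvStep c d) with
      | none => rfl
      | some k' => rw [hx] at h; simp at h
    have hd' : 0 < pvStep c d := Nat.pos_of_ne_zero h0
    rw [pvScanB, if_neg (by omega)]
    by_cases hc1 : c = '('
    · rw [if_pos hc1]
      have IH := ih (d := pvStep c d) hd' hrec out (raw ++ [c]) (expr ++ [c])
      rw [show pvStep c d = d + 1 from by simp [pvStep, hc1]] at IH
      rw [IH]; simp
    · by_cases hc2 : c = ')'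
      · rw [if_neg hc1, if_pos hc2]
        have hne : ¬ d - 1 = 0 := by
          intro hx; apply h0; simp [pvStep, hc1, hc2, hx]
        rw [if_neg hne]
        have IH := ih (d := pvStep c d) hd' hrec out (raw ++ [c]) (expr ++ [c])
        rw [show pvStep c d = d - 1 from by simp [pvStep, hc1, hc2]] at IH
        rw [IH]; simp
      · rw [if_neg hc1, if_neg hc2]
        have IH := ih (d := pvStep c d) hd' hrec out (raw ++ [c]) (expr ++ [c])
        rw [show pvStep c d = d from by simp [pvStep, hc1, hc2]] at IH
        rw [IH]; simp

theorem pvScanB_copy {u : List Char} (h : ¬ pvLift <:+: u)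
    (out : List (List Char)) (raw expr : List Char) :
    pvScanB u out raw expr 0 = out ++ u.map (fun c => [c]) := by
  induction u generalizing out with
  | nil => rw [pvScanB]; simp
  | cons c rest ih =>
    have hs : PySem.Chars.startswith (c :: rest) pvLift = false := by
      rw [← Bool.not_eq_true, PySem.Chars.startswith_iff]
      intro hp; exact h hp.isInfix
    rw [pvScanB, if_pos rfl, hs]
    simp only [Bool.false_eq_true, if_false]
    rw [ih (fun hx => h (List.infix_cons hx)) (out ++ [[c]])]
    simp

theorem pvScanB_toLift {u : List Char} {j : Nat}
    (hmin : ∀ i < j, ¬ pvLift <+: u.drop i) (hj : pvLift <+: u.drop j)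
    (out : List (List Char)) (raw expr : List Char) :
    pvScanB u out raw expr 0 =
      pvScanB (u.drop (j + 6)) (out ++ (u.take j).map (fun c => [c])) pvLift [] 1 := by
  induction j generalizing u out raw expr with
  | zero =>
    simp only [List.drop_zero] at hj
    cases u with
    | nil => rw [List.prefix_nil] at hj; simp [pvLift] at hj
    | cons c rest =>
      have hs : PySem.Chars.startswith (c :: rest) pvLift = true :=
        (PySem.Chars.startswith_iff _ _).mpr hj
      rw [pvScanB, if_pos rfl, hs]
      simp
  | succ j ihj =>
    cases u with
    | nil =>
      rw [show (List.drop (j + 1) ([] : List Char)) = [] from by simp, List.prefix_nil] at hj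
      simp [pvLift] at hj
    | cons c rest =>
      have h0 : ¬ pvLift <+: (c :: rest) := by
        have := hmin 0 (by omega); simpa using this
      have hs : PySem.Chars.startswith (c :: rest) pvLift = false := by
        rw [← Bool.not_eq_true, PySem.Chars.startswith_iff]; exact h0
      rw [pvScanB, if_pos rfl, hs]
      simp only [Bool.false_eq_true, if_false]
      have hmin' : ∀ i < j, ¬ pvLift <+: rest.drop i := by
        intro i hij
        have := hmin (i + 1) (by omega)
        simpa using this
      have hj' : pvLift <+: rest.drop j := by simpa using hj
      rw [ihj hmin' hj' (out ++ [[c]]) raw expr]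
      simp

theorem pvScanB_flatten (u : List Char) (out : List (List Char)) (raw expr : List Char) :
    (pvScanB u out raw expr 0).flatten = out.flatten ++ pvGA u := by
  by_cases hinf : pvLift <:+: u
  · have hpos0 : 0 ≤ PySem.Chars.find u pvLift := (PySem.Chars.find_nonneg_iff u pvLift).mpr hinf
    have hspec := PySem.Chars.find_spec hpos0
    rw [pvScanB_toLift hspec.2 hspec.1 out raw expr]
    rw [pvGA, dif_pos hinf]
    cases hk : pvPClose (u.drop ((PySem.Chars.find u pvLift).toNat + 6)) 1 with
    | none =>
      rw [pvScanB_open (by omega) hk]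
      simp only [List.flatten_append, List.flatten_cons, List.flatten_nil,
        pvFlattenSingletons, List.append_nil, List.append_assoc]
      rw [pvLift_reconstruct hspec.1]
    | some k =>
      rw [pvScanB_close (by omega) hk, pvScanB_flatten]
      simp [List.append_assoc]
      rw [← List.map_take, pvFlattenSingletons]
  · rw [pvScanB_copy hinf, pvGA, dif_neg hinf]
    simp [pvFlattenSingletons]
termination_by u.length
decreasing_by exact pvDecGA u hinf _ _

-- the two slice forms A uses, at natural indices
theorem pvSlice_nat (s : List Char) (a b : Nat) :
    PySem.Chars.slice s (some (a : Int)) (some (b : Int)) = (s.drop a).take (b - a) := by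
  simp [PySem.Chars.slice_eq_listSlice, PySem.List.slice_natCast]

theorem pvSlice_from (s : List Char) (a : Nat) :
    PySem.Chars.slice s (some (a : Int)) none = s.drop a := by
  simp [PySem.Chars.slice_eq_listSlice, PySem.List.slice_from_natCast]

theorem pvOuterA_flatten (s : List Char) (pos : Nat) (out : List (List Char))
    (hpos : pos ≤ s.length) :
    (pvOuterA s pos out).flatten = out.flatten ++ pvGA (s.drop pos) := by
  by_cases hlt : pos < s.length
  case neg =>
    have hpe : pos = s.length := by omega
    rw [pvOuterA, dif_neg hlt, hpe, List.drop_length, pvGA_nil]; simp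
  case pos =>
  rw [pvOuterA, dif_pos hlt]
  rw [PySem.Chars.findFrom_natCast s pvLift pos hpos]
  by_cases hf : PySem.Chars.find (s.drop pos) pvLift = -1
  · rw [if_pos hf, dif_pos rfl, pvSlice_from]
    rw [pvGA, dif_neg ((PySem.Chars.find_eq_neg_one_iff _ _).mp hf)]
    simp
  · have hge : 0 ≤ PySem.Chars.find (s.drop pos) pvLift := by
      have := PySem.Chars.neg_one_le_find (s.drop pos) pvLift
      omega
    have hcast : PySem.Chars.find (s.drop pos) pvLift
        = (((PySem.Chars.find (s.drop pos) pvLift).toNat : Nat) : Int) := by omega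
    set j := (PySem.Chars.find (s.drop pos) pvLift).toNat with hj
    rw [if_neg hf, hcast, dif_neg (by push_cast; omega)]
    have hcast2 : ((pos : Int) + (j : Int)) = ((pos + j : Nat) : Int) := by push_cast; ring
    rw [hcast2, Int.toNat_natCast]
    have hpre : pvLift <+: (s.drop pos).drop j := (PySem.Chars.find_spec hge).1
    have hpre' : pvLift <+: s.drop (pos + j) := by rwa [List.drop_drop] at hpre
    have hlen6 : pos + j + 6 ≤ s.length := by
      have := hpre'.length_le
      simp [pvLift] at this
      omega
    have hinf : pvLift <:+: s.drop pos :=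
      hpre.isInfix.trans (List.drop_suffix j (s.drop pos)).isInfix
    have hdd : (s.drop pos).drop (j + 6) = s.drop (pos + j + 6) := by
      rw [List.drop_drop]; ring_nf
    cases hk : pvPClose (s.drop (pos + j + 6)) 1 with
    | some k =>
      have hb := pvPClose_bounds hk
      have hkle : pos + j + 6 + k ≤ s.length := by
        have h2 := hb.2; simp at h2; omega
      have hIA := pvInnerA_some s (pos + j + 6) 1 k (by omega) (by omega) hk
      rw [hIA]
      have hcast3 : (((pos + j + 6 + k, 0) : Nat × Nat).1 : Int) - 1
          = ((pos + j + 6 + k - 1 : Nat) : Int) := by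
        simp only []; push_cast [Nat.cast_sub (by omega : 1 ≤ pos + j + 6 + k)]; ring
      rw [hcast3, pvSlice_nat, pvSlice_nat]
      split
      · rw [pvOuterA_flatten s (pos + j + 6 + k) _ (by omega)]
        conv_rhs => rw [pvGA]
        rw [dif_pos hinf, ← hj, hdd, hk]
        simp only [List.flatten_append, List.flatten_cons, List.flatten_nil, List.append_nil,
          List.append_assoc, List.drop_drop]
        have e1 : pos + j - pos = j := by omega
        have e2 : pos + j + 6 + k - 1 - (pos + j + 6) = k - 1 := by omega
        rw [e1, e2]
      · rename_i hcc; simp at hcc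
    | none =>
      have hIA := pvInnerA_none s (pos + j + 6) 1 (by omega) (by omega) hk
      rw [if_neg (by omega)]
      rw [pvSlice_nat, pvSlice_from]
      rw [pvGA, dif_pos hinf, ← hj, hdd, hk]
      simp only [List.flatten_append, List.flatten_cons, List.flatten_nil, List.append_nil,
        List.append_assoc]
      congr 1
      rw [show pos + j - pos = j from by omega]
      rw [show s.drop (pos + j) = (s.drop pos).drop j from by rw [List.drop_drop]]
      rw [List.take_append_drop]
termination_by s.length - pos
decreasing_by omega

-- ===== VERDICT (by name: the statement is the Claim_ definition above) =====
theorem replace_macros_in_text_py_spec : Claim_equal_replace_macros_in_text_py := by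
  intro text _
  unfold Spec_replace_macros_in_text_py replace_macros_in_text_py replace_macros_in_text_py_alt
  rw [pvOuterA_flatten text.toList 0 [] (by omega), pvScanB_flatten]
  simp
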